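-- pv_equiv track=rewrite | github.com/aimclub/FEDOT | methods/forecasting.py | parse_gap_ids
-- ===== SOURCE A (Python) =====
-- def parse_gap_ids(gap_list: list) -> list:
--     """
--     Method allows parsing source array with gaps indexes
--
--     :param gap_list: array with indexes of gaps in array
--     :return: a list with separated gaps in continuous intervals
--     """
--
--     new_gap_list = []
--     local_gaps = []
--     for index, gap in enumerate(gap_list):
--         if index == 0:
--             local_gaps.append(gap)
--         else:
--             prev_gap = gap_list[index - 1]
--             if gap - prev_gap > 1:
--                 # There is a "gap" between gaps
--                 new_gap_list.append(local_gaps)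
--
--                 local_gaps = []
--                 local_gaps.append(gap)
--             else:
--                 local_gaps.append(gap)
--     new_gap_list.append(local_gaps)
--
--     return new_gap_list
-- ===== SOURCE B (Python) =====
-- def parse_gap_ids(gap_list: list) -> list:
--     """Split gap indexes into contiguous intervals: break positions, then slices."""
--     n = len(gap_list)
--     breaks = [i for i in range(1, n) if gap_list[i] - gap_list[i - 1] > 1]
--     bounds = [0] + breaks + [n]
--     return [gap_list[bounds[k]:bounds[k + 1]] for k in range(len(bounds) - 1)]
-- ===== Notes on version B (the rewrite author's own statement) =====
-- stated objective: alternative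
-- what changed: Instead of one stateful accumulator loop, B first collects the break positions (indices whose difference from the predecessor exceeds 1), prepends zero and appends the length to form a boundary list, and emits the groups as slices between consecutive boundaries.
import Mathlib
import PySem

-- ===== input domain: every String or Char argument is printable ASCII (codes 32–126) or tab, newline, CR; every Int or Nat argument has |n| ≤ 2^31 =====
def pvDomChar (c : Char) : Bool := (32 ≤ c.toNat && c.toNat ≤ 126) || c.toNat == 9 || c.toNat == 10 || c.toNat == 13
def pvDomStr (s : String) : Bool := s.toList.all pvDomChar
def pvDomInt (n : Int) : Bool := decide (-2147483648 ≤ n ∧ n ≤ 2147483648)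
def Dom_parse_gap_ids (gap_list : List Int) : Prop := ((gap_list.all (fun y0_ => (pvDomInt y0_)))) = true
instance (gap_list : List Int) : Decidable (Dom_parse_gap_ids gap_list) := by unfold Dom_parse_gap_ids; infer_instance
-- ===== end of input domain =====

-- B re-implements A by collecting break positions and slicing between consecutive
-- boundaries, instead of A's single stateful accumulator loop; same cost, different shape.

-- ===== PORT A =====
-- literal port of A: fold over enumerate(gap_list) carrying (new_gap_list, local_gaps);
-- gap_list[index-1] (always in range here) is ported as pyGetD with default 0
def parse_gap_ids (gap_list : List Int) : List (List Int) :=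
  let st := (PySem.List.enumerate gap_list 0).foldl
    (fun (s : List (List Int) × List Int) (iq : Int × Int) =>
      if iq.1 = 0 then (s.1, s.2 ++ [iq.2])
      else
        let prev_gap := PySem.List.pyGetD gap_list (iq.1 - 1) 0
        if iq.2 - prev_gap > 1 then (s.1 ++ [s.2], [iq.2])
        else (s.1, s.2 ++ [iq.2]))
    ([], [])
  st.1 ++ [st.2]

-- ===== PORT B =====
-- literal port of Source B: break positions, boundary list, then slices between boundaries
def parse_gap_ids_alt (gap_list : List Int) : List (List Int) :=
  let n : Int := gap_list.length
  let breaks : List Int := (PySem.List.pyRange 1 n 1).filter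
    (fun i => PySem.List.pyGetD gap_list i 0 - PySem.List.pyGetD gap_list (i - 1) 0 > 1)
  let bounds : List Int := 0 :: (breaks ++ [n])
  (PySem.List.pyRange 0 ((bounds.length : Int) - 1) 1).map
    (fun k => PySem.List.slice gap_list (some (PySem.List.pyGetD bounds k 0))
                (some (PySem.List.pyGetD bounds (k + 1) 0)))

-- ===== PRECONDITION & SPEC =====
def Spec_parse_gap_ids (gap_list : List Int) (out : List (List Int)) : Prop := out = parse_gap_ids_alt gap_list
instance (gap_list : List Int) (out : List (List Int)) : Decidable (Spec_parse_gap_ids gap_list out) := by unfold Spec_parse_gap_ids; infer_instance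

-- ===== CLAIM (what is proved, stated in full; the proofs are below) =====
def Claim_equal_parse_gap_ids : Prop := ∀ (gap_list : List Int), Dom_parse_gap_ids gap_list → Spec_parse_gap_ids gap_list (parse_gap_ids gap_list)

-- ===== LEMMAS AND PROOFS =====

-- the common recursive description of "group by runs where the step to the predecessor is ≤ 1"
def groupRec : Int → List Int → List Int → List (List Int)
  | _, [], acc => [acc]
  | prev, y :: ys, acc =>
      if y - prev > 1 then acc :: groupRec y ys [y] else groupRec y ys (acc ++ [y])

-- pair-level state transformer of A's loop (index bookkeeping removed)
def goP : Int → List Int → List (List Int) × List Int → List (List Int) × List Int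
  | _, [], s => s
  | prev, y :: ys, s =>
      goP y ys (if y - prev > 1 then (s.1 ++ [s.2], [y]) else (s.1, s.2 ++ [y]))

-- break positions of the suffix starting at index j, predecessor prev
def breaksRec : Int → List Int → Int → List Int
  | _, [], _ => []
  | prev, y :: ys, j =>
      (if y - prev > 1 then [j] else []) ++ breaksRec y ys (j + 1)

-- slices of gl between consecutive bounds, starting from lower bound a
def sliceSeq (gl : List Int) : Int → List Int → List (List Int)
  | _, [] => []
  | a, b :: bs => PySem.List.slice gl (some a) (some b) :: sliceSeq gl b bs

theorem sliceSeq_nil (gl : List Int) (a : Int) : sliceSeq gl a [] = [] := rfl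

theorem sliceSeq_cons (gl : List Int) (a b : Int) (bs : List Int) :
    sliceSeq gl a (b :: bs) = PySem.List.slice gl (some a) (some b) :: sliceSeq gl b bs := rfl

theorem goP_eq_groupRec (xs : List Int) : ∀ (x : Int) (res : List (List Int)) (acc : List Int),
    (goP x xs (res, acc)).1 ++ [(goP x xs (res, acc)).2] = res ++ groupRec x xs acc := by
  induction xs with
  | nil => intro x res acc; simp [goP, groupRec]
  | cons y ys ih =>
      intro x res acc
      by_cases h : y - x > 1 <;> simp [goP, groupRec, h, ih]

theorem A_inv (gl : List Int) : ∀ (suf : List Int) (j : Nat) (prev : Int)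
    (s : List (List Int) × List Int),
    suf = gl.drop j → 1 ≤ j → PySem.List.pyGetD gl ((j : Int) - 1) 0 = prev →
    (PySem.List.enumerate suf (j : Int)).foldl
      (fun (s : List (List Int) × List Int) (iq : Int × Int) =>
        if iq.1 = 0 then (s.1, s.2 ++ [iq.2])
        else
          let prev_gap := PySem.List.pyGetD gl (iq.1 - 1) 0
          if iq.2 - prev_gap > 1 then (s.1 ++ [s.2], [iq.2])
          else (s.1, s.2 ++ [iq.2])) s
    = goP prev suf s := by
  intro suf
  induction suf with
  | nil => intro j prev s _ _ _; simp [PySem.List.enumerate_nil, goP]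
  | cons y ys ih =>
      intro j prev s hdrop hj hprev
      have hjlen : j < gl.length := by
        by_contra h
        simp [List.drop_eq_nil_of_le (Nat.le_of_not_lt h)] at hdrop
      have hy : gl[j] = y := by
        have h0 : gl[j]? = some y := by
          rw [show j = j + 0 by omega, ← List.getElem?_drop, ← hdrop]; rfl
        simpa [List.getElem?_eq_getElem hjlen] using h0
      have hys : ys = gl.drop (j + 1) := by
        have h1 := congrArg (List.drop 1) hdrop
        simpa [List.drop_drop, Nat.add_comm] using h1
      rw [PySem.List.enumerate_cons, List.foldl_cons]
      have hj0 : ¬ ((j : Int) = 0) := by omega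
      have hnext : PySem.List.pyGetD gl (((j : Int) + 1) - 1) 0 = y := by
        have : ((j : Int) + 1) - 1 = ((j : Nat) : Int) := by omega
        rw [this, PySem.List.pyGetD_natCast]
        simp [List.getD, hjlen, hy]
      have hstep : ((j : Int) + 1) = (((j + 1 : Nat)) : Int) := by push_cast; ring
      rw [hstep] at hnext ⊢
      rw [ih (j + 1) y _ hys (by omega) hnext]
      simp only [hj0, if_false, hprev]
      by_cases h : y - prev > 1 <;> simp [goP, h]

theorem BR_inv (gl : List Int) : ∀ (suf : List Int) (j : Nat) (prev : Int),
    suf = gl.drop j → 1 ≤ j → PySem.List.pyGetD gl ((j : Int) - 1) 0 = prev →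
    (PySem.List.pyRange (j : Int) (gl.length : Int) 1).filter
      (fun i => PySem.List.pyGetD gl i 0 - PySem.List.pyGetD gl (i - 1) 0 > 1)
    = breaksRec prev suf (j : Int) := by
  intro suf
  induction suf with
  | nil =>
      intro j prev hdrop _ _
      have : gl.length ≤ j := by
        by_contra h
        simp [List.drop_eq_nil_iff] at hdrop; omega
      rw [PySem.List.pyRange_one_eq_nil (by omega)]
      simp [breaksRec]
  | cons y ys ih =>
      intro j prev hdrop hj hprev
      have hjlen : j < gl.length := by
        by_contra h
        simp [List.drop_eq_nil_of_le (Nat.le_of_not_lt h)] at hdrop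
      have hy : gl[j] = y := by
        have h0 : gl[j]? = some y := by
          rw [show j = j + 0 by omega, ← List.getElem?_drop, ← hdrop]; rfl
        simpa [List.getElem?_eq_getElem hjlen] using h0
      have hys : ys = gl.drop (j + 1) := by
        have h1 := congrArg (List.drop 1) hdrop
        simpa [List.drop_drop, Nat.add_comm] using h1
      rw [PySem.List.pyRange_one_cons (by exact_mod_cast hjlen), List.filter_cons]
      have hgj : PySem.List.pyGetD gl ((j : Int)) 0 = y := by
        rw [PySem.List.pyGetD_natCast]; simp [List.getD, hjlen, hy]
      have hstep : ((j : Int) + 1) = (((j + 1 : Nat)) : Int) := by push_cast; ring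
      have hnext : PySem.List.pyGetD gl ((((j + 1 : Nat)) : Int) - 1) 0 = y := by
        have : (((j + 1 : Nat)) : Int) - 1 = ((j : Nat) : Int) := by push_cast; ring
        rw [this, hgj]
      rw [hstep, ih (j + 1) y hys (by omega) hnext]
      simp only [breaksRec, hgj, hprev, ← hstep]
      by_cases h : y - prev > 1 <;> simp [h]

theorem SL_inv (gl : List Int) : ∀ (suf : List Int) (j b : Nat) (prev : Int),
    suf = gl.drop j → b ≤ j → j ≤ gl.length →
    sliceSeq gl (b : Int) (breaksRec prev suf (j : Int) ++ [(gl.length : Int)])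
    = groupRec prev suf ((gl.drop b).take (j - b)) := by
  intro suf
  induction suf with
  | nil =>
      intro j b prev hdrop hb hjl
      have hjlen : gl.length ≤ j := by
        by_contra h
        simp [List.drop_eq_nil_iff] at hdrop; omega
      have hj : j = gl.length := by omega
      subst hj
      simp only [breaksRec, List.nil_append, groupRec]
      rw [sliceSeq_cons, sliceSeq_nil, PySem.List.slice_natCast]
  | cons y ys ih =>
      intro j b prev hdrop hb hjl
      have hjlen : j < gl.length := by
        by_contra h
        simp [List.drop_eq_nil_of_le (Nat.le_of_not_lt h)] at hdrop
      have hy : gl[j] = y := by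
        have h0 : gl[j]? = some y := by
          rw [show j = j + 0 by omega, ← List.getElem?_drop, ← hdrop]; rfl
        simpa [List.getElem?_eq_getElem hjlen] using h0
      have hys : ys = gl.drop (j + 1) := by
        have h1 := congrArg (List.drop 1) hdrop
        simpa [List.drop_drop, Nat.add_comm] using h1
      have hstep : ((j : Int) + 1) = (((j + 1 : Nat)) : Int) := by push_cast; ring
      by_cases h : y - prev > 1
      · simp only [breaksRec, h, if_true, List.singleton_append, groupRec]
        rw [List.cons_append, sliceSeq_cons, hstep, ih (j + 1) j y hys (by omega) (by omega)]
        rw [PySem.List.slice_natCast]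
        congr 1
        · have : (gl.drop j).take (j + 1 - j) = (gl.drop j).take 1 := by congr 1; omega
          rw [this]
          have : gl.drop j = y :: ys := hdrop.symm
          simp [this]
      · simp only [breaksRec, h, if_false, List.nil_append, groupRec]
        rw [hstep, ih (j + 1) b y hys (by omega) (by omega)]
        congr 1
        have h1 : (gl.drop b).take (j + 1 - b) = (gl.drop b).take ((j - b) + 1) := by
          congr 1; omega
        rw [h1, List.take_add_one]
        congr 1
        have hlt : j - b < (gl.drop b).length := by simp; omega
        rw [List.getElem?_eq_getElem hlt]
        have : (gl.drop b)[j - b] = gl[b + (j - b)] := List.getElem_drop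
        simp [this, (by omega : b + (j - b) = j), hy]

-- B1: the range-indexed slice comprehension is sliceSeq over the bounds list
theorem B1 (gl : List Int) : ∀ (rest : List Int) (a : Int),
    ((List.range rest.length).map
      (fun (k : Nat) => PySem.List.slice gl (some (PySem.List.pyGetD (a :: rest) ((k : Int)) 0))
                  (some (PySem.List.pyGetD (a :: rest) (((k : Int)) + 1) 0))))
    = sliceSeq gl a rest := by
  intro rest
  induction rest with
  | nil => intro a; simp [sliceSeq_nil]
  | cons c rs ih =>
      intro a
      simp only [List.length_cons]
      rw [List.range_succ_eq_map, List.map_cons, List.map_map, sliceSeq_cons]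
      congr 1
      · norm_num [PySem.List.pyGetD_natCast]
        rw [show (1 : Int) = ((1 : Nat) : Int) by norm_num, PySem.List.pyGetD_natCast]
        rfl
      · rw [← ih c]
        apply List.map_congr_left
        intro k _
        simp only [Function.comp_apply]
        rw [show (((k + 1 : Nat)) : Int) + 1 = (((k + 2 : Nat)) : Int) by push_cast; ring,
            show ((k : Int) + 1) = (((k + 1 : Nat)) : Int) by push_cast; ring]
        simp only [PySem.List.pyGetD_natCast]
        simp

-- ===== VERDICT (by name: the statement is the Claim_ definition above) =====
theorem parse_gap_ids_spec : Claim_equal_parse_gap_ids := by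
  intro gl _
  unfold Spec_parse_gap_ids
  match gl with
  | [] => decide
  | x :: xs =>
      have hA : parse_gap_ids (x :: xs) = groupRec x xs [x] := by
        unfold parse_gap_ids
        rw [PySem.List.enumerate_cons, List.foldl_cons]
        norm_num
        have hAi := A_inv (x :: xs) xs 1 x ([], [x]) (by simp) (by omega)
          (by norm_num [PySem.List.pyGetD_zero_cons])
        simp only [Nat.cast_one] at hAi
        rw [hAi]
        simpa using goP_eq_groupRec xs x [] [x]
      have hB : parse_gap_ids_alt (x :: xs) = groupRec x xs [x] := by
        simp only [parse_gap_ids_alt]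
        have hBr := BR_inv (x :: xs) xs 1 x (by simp) (by omega)
          (by norm_num [PySem.List.pyGetD_zero_cons])
        simp only [Nat.cast_one] at hBr
        rw [hBr]
        set br : List Int := breaksRec x xs 1 with hbr
        have hlen : (((((0 : Int) :: (br ++ [((x :: xs).length : Int)])).length : Nat)) : Int) - 1
            = (((br ++ [((x :: xs).length : Int)]).length : Nat) : Int) := by
          simp
        rw [hlen, PySem.List.pyRange_zero_natCast, List.map_map]
        simp only [Function.comp_def]
        rw [B1 (x :: xs) (br ++ [((x :: xs).length : Int)]) 0]
        have hSL := SL_inv (x :: xs) xs 1 0 x (by simp) (by omega) (by simp)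
        simp only [Nat.cast_one, Nat.cast_zero] at hSL
        rw [← hbr] at hSL
        rw [hSL]
        simp
      rw [hA, hB]
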